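-- pv_equiv track=rewrite | github.com/Srinidhi-SA/temp_api | api/models/model_helper_c3.py | convert_array_type_data_to_column_data_xs
-- ===== SOURCE A (Python) =====
-- def convert_array_type_data_to_column_data_xs(data):
--     data = data[1:]
--     final_data = [['blue'],['blue_x'],['red'], ['red_x'], ['green'], ['green_x']]
--
--     xs = {
--         'blue': 'blue_x',
--         'red': 'red_x',
--         'green': 'green_x'
--     }
--
--     mapp = {
--         'blue': 0,
--         'blue_x': 1,
--         'red': 2,
--         'red_x': 3,
--         'green': 4,
--         'green_x': 5
--     }
--
--     for d in data:
--         final_data[mapp[d[2].lower()]].append(d[1])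
--         final_data[mapp[d[2].lower()+'_x']].append(d[0])
--
--     change_name = {
--         'blue': 'outperform',
--         'red': 'underperform',
--         'green': 'constant',
--         'blue_x': 'outperform_x',
--         'red_x': 'underperform_x',
--         'green_x': 'constant_x'
--     }
--
--     end_name_xs = {
--         'outperform': 'outperform_x',
--         'constant': 'constant_x',
--         'underperform': 'underperform_x',
--     }
--
--     for d in final_data:
--         d[0] = change_name[d[0]]
--
--
--     return final_data, end_name_xs
-- ===== SOURCE B (Python) =====
-- def convert_array_type_data_to_column_data_xs(data):
--     # Staged passes: one filtered scan of the rows per output column (six scans),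
--     # no shared mutable table and no relabel pass. Unknown colors are simply not
--     # selected by any filter (A raises KeyError there; those inputs are outside Pre_).
--     rows = data[1:]
--
--     def column(color, idx):
--         return [d[idx] for d in rows if d[2].lower() == color]
--
--     final_data = []
--     for color, name in (('blue', 'outperform'), ('red', 'underperform'), ('green', 'constant')):
--         final_data.append([name] + column(color, 1))
--         final_data.append([name + '_x'] + column(color, 0))
--
--     end_name_xs = {
--         'outperform': 'outperform_x',
--         'constant': 'constant_x',
--         'underperform': 'underperform_x',
--     }
--     return final_data, end_name_xs
-- ===== Notes on version B (the rewrite author's own statement) =====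
-- stated objective: alternative
-- what changed: Replaces A's single pass that mutates a pre-seeded 6-list table via an index map plus a second relabel pass with six independent filtered scans (one per output column, selecting rows by color and projecting the wanted field), assembled directly under the final header names.
import Mathlib
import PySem

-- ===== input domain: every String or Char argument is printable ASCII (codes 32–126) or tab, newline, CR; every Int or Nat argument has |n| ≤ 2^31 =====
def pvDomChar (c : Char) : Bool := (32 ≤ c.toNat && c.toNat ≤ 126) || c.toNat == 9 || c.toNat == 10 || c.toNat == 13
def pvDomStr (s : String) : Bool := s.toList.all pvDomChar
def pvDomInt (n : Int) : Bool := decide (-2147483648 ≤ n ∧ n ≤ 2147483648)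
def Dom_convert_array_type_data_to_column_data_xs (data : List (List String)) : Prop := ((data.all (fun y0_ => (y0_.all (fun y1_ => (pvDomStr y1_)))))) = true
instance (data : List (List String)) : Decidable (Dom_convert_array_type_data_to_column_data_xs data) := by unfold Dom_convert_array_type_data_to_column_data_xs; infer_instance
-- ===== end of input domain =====

-- B replaces A's mutable 6-list table (index map + relabel pass) by six independent
-- filtered scans, one per output column, assembled under the final names (objective: alternative).

-- ===== PORT A =====
def pvMappA : PySem.Dict String Nat := PySem.Dict.ofList
  [("blue", 0), ("blue_x", 1), ("red", 2), ("red_x", 3), ("green", 4), ("green_x", 5)]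

def pvChangeName : PySem.Dict String String := PySem.Dict.ofList
  [("blue", "outperform"), ("red", "underperform"), ("green", "constant"),
   ("blue_x", "outperform_x"), ("red_x", "underperform_x"), ("green_x", "constant_x")]

-- final_data[i].append(v): set index i to its value with v appended
-- (the index is in range on every input Pre_ admits; getD/default never fires there)
def pvAppendAt (fd : List (List String)) (i : Nat) (v : String) : List (List String) :=
  fd.set i (fd.getD i [] ++ [v])

-- body of A's first loop (Python raises KeyError/IndexError where the defaults fire;
-- Pre_ excludes those inputs)
def pvStepA (fd : List (List String)) (d : List String) : List (List String) :=
  let c := PySem.Str.lower (PySem.List.pyGetD d 2 "")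
  pvAppendAt (pvAppendAt fd (PySem.Dict.getD pvMappA c 0) (PySem.List.pyGetD d 1 ""))
    (PySem.Dict.getD pvMappA (c ++ "_x") 0) (PySem.List.pyGetD d 0 "")

def convert_array_type_data_to_column_data_xs (data : List (List String)) :
    List (List String) × (List (String × String)) :=
  let data := data.drop 1
  let final_data : List (List String) :=
    [["blue"], ["blue_x"], ["red"], ["red_x"], ["green"], ["green_x"]]
  let final_data := data.foldl pvStepA final_data
  -- second loop: d[0] = change_name[d[0]] (rows are always nonempty here)
  let final_data := final_data.map (fun d =>
    match d with
    | [] => []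
    | h :: t => PySem.Dict.getD pvChangeName h h :: t)
  (final_data,
   [("outperform", "outperform_x"), ("constant", "constant_x"), ("underperform", "underperform_x")])

-- ===== PORT B =====
-- one filtered scan: rows whose color matches, projected to field idx
def pvColumn (rows : List (List String)) (color : String) (idx : Nat) : List String :=
  (rows.filter (fun d => PySem.Str.lower (PySem.List.pyGetD d 2 "") == color)).map
    (fun d => PySem.List.pyGetD d idx "")

def convert_array_type_data_to_column_data_xs_alt (data : List (List String)) :
    List (List String) × (List (String × String)) :=
  let rows := data.drop 1
  let final_data :=
    ([("blue", "outperform"), ("red", "underperform"), ("green", "constant")] :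
        List (String × String)).foldl
      (fun acc p =>
        acc ++ [p.2 :: pvColumn rows p.1 1, (p.2 ++ "_x") :: pvColumn rows p.1 0]) []
  (final_data,
   [("outperform", "outperform_x"), ("constant", "constant_x"), ("underperform", "underperform_x")])

-- ===== PRECONDITION & SPEC =====
-- Pre_ excludes exactly the inputs where Python A raises: a row after the first with
-- fewer than 3 entries (IndexError) or whose third entry does not lower-case to one of
-- blue/red/green (KeyError).
def Pre_convert_array_type_data_to_column_data_xs (data : List (List String)) : Prop :=
  ∀ d ∈ data.drop 1, 3 ≤ d.length ∧
    PySem.Str.lower (PySem.List.pyGetD d 2 "") ∈ (["blue", "red", "green"] : List String)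
instance (data : List (List String)) : Decidable (Pre_convert_array_type_data_to_column_data_xs data) := by
  unfold Pre_convert_array_type_data_to_column_data_xs; infer_instance

def pvWitness_convert_array_type_data_to_column_data_xs : List (List String) :=
  [["h1", "h2", "h3"], ["1", "2", "Blue"], ["3", "4", "red"], ["5", "6", "GREEN"]]

def Spec_convert_array_type_data_to_column_data_xs (data : List (List String)) (out : List (List String) × (List (String × String))) : Prop := out = convert_array_type_data_to_column_data_xs_alt data
instance (data : List (List String)) (out : List (List String) × (List (String × String))) : Decidable (Spec_convert_array_type_data_to_column_data_xs data out) := by unfold Spec_convert_array_type_data_to_column_data_xs; infer_instance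

-- ===== CLAIM (what is proved, stated in full; the proofs are below) =====
def Claim_equal_convert_array_type_data_to_column_data_xs : Prop := ∀ (data : List (List String)), Dom_convert_array_type_data_to_column_data_xs data → Pre_convert_array_type_data_to_column_data_xs data → Spec_convert_array_type_data_to_column_data_xs data (convert_array_type_data_to_column_data_xs data)


-- ===== LEMMAS AND PROOFS =====

-- A's fold keeps the six heads fixed and appends each row's fields to the slots of its
-- color: the tails are exactly B's filtered columns.
theorem pvFold_filter
    (l : List (List String))
    (hl : ∀ d ∈ l, PySem.Str.lower (PySem.List.pyGetD d 2 "") ∈ (["blue", "red", "green"] : List String))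
    (b bx r rx g gx : List String) :
    l.foldl pvStepA
      [ "blue" :: b, "blue_x" :: bx, "red" :: r, "red_x" :: rx, "green" :: g, "green_x" :: gx ]
    = [ "blue" :: (b ++ pvColumn l "blue" 1), "blue_x" :: (bx ++ pvColumn l "blue" 0),
        "red" :: (r ++ pvColumn l "red" 1), "red_x" :: (rx ++ pvColumn l "red" 0),
        "green" :: (g ++ pvColumn l "green" 1), "green_x" :: (gx ++ pvColumn l "green" 0) ] := by
  induction l generalizing b bx r rx g gx with
  | nil => simp [pvColumn]
  | cons d l ih =>
    have hd := hl d (by simp)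
    have hrest : ∀ e ∈ l, PySem.Str.lower (PySem.List.pyGetD e 2 "") ∈ (["blue", "red", "green"] : List String) :=
      fun e he => hl e (by simp [he])
    simp only [List.mem_cons, List.not_mem_nil, or_false] at hd
    rcases hd with h | h | h
    · have e1 : PySem.Dict.getD pvMappA "blue" 0 = 0 := rfl
      have e2 : PySem.Dict.getD pvMappA "blue_x" 0 = 1 := rfl
      simp [List.foldl_cons, pvStepA, pvAppendAt, h, e1, e2, List.getD,
        ih hrest, pvColumn]
    · have e1 : PySem.Dict.getD pvMappA "red" 0 = 2 := rfl
      have e2 : PySem.Dict.getD pvMappA "red_x" 0 = 3 := rfl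
      simp [List.foldl_cons, pvStepA, pvAppendAt, h, e1, e2, List.getD,
        ih hrest, pvColumn]
    · have e1 : PySem.Dict.getD pvMappA "green" 0 = 4 := rfl
      have e2 : PySem.Dict.getD pvMappA "green_x" 0 = 5 := rfl
      simp [List.foldl_cons, pvStepA, pvAppendAt, h, e1, e2, List.getD,
        ih hrest, pvColumn]

-- ===== VERDICT (by name: the statement is the Claim_ definition above) =====
theorem convert_array_type_data_to_column_data_xs_spec : Claim_equal_convert_array_type_data_to_column_data_xs := by
  intro data _ hpre
  unfold Spec_convert_array_type_data_to_column_data_xs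
  simp only [convert_array_type_data_to_column_data_xs, convert_array_type_data_to_column_data_xs_alt]
  rw [show ([["blue"], ["blue_x"], ["red"], ["red_x"], ["green"], ["green_x"]] : List (List String))
      = [ "blue" :: [], "blue_x" :: [], "red" :: [], "red_x" :: [], "green" :: [], "green_x" :: [] ] from rfl,
    pvFold_filter (data.drop 1) (fun d hd => (hpre d hd).2)]
  simp only [List.foldl_cons, List.foldl_nil, List.map, List.nil_append,
    List.cons_append, List.nil_append]
  exact rfl
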